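-- pv_equiv track=rewrite | github.com/clayton-grey/board-game-prototyping-app | patch.py | find_ai_context_block
-- ===== SOURCE A (Python) =====
-- def find_ai_context_block(content: str) -> tuple:
--     """
--     Return the start and end indices of the <ai_context> block if present, otherwise (-1, -1).
--     """
--     start_marker = "# <ai_context>"
--     end_marker = "# </ai_context>"
--
--     lines = content.splitlines()
--     start_index = -1
--     end_index = -1
--
--     for i, line in enumerate(lines):
--         if start_marker in line:
--             start_index = i
--         if end_marker in line:
--             end_index = i
--             break
--
--     return start_index, end_index
-- ===== SOURCE B (Python) =====
-- def find_ai_context_block(content: str) -> tuple: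
--     """
--     Return the start and end indices of the <ai_context> block if present, otherwise (-1, -1).
--     """
--     start_marker = "# <ai_context>"
--     end_marker = "# </ai_context>"
--
--     lines = content.splitlines()
--     end_index = next((i for i, line in enumerate(lines) if end_marker in line), -1)
--     search = lines if end_index == -1 else lines[:end_index + 1]
--     start_index = next(
--         (i for i, line in reversed(list(enumerate(search))) if start_marker in line), -1
--     )
--     return start_index, end_index
-- ===== Notes on version B (the rewrite author's own statement) =====
-- stated objective: alternative
-- what changed: A's single stateful loop (carrying start_index and breaking at the end marker) is replaced by two independent passes: a forward scan for the first end-marker line, then a reversed scan of the prefix up to it (or of all lines) that stops at the last start-marker line.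
import Mathlib
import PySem

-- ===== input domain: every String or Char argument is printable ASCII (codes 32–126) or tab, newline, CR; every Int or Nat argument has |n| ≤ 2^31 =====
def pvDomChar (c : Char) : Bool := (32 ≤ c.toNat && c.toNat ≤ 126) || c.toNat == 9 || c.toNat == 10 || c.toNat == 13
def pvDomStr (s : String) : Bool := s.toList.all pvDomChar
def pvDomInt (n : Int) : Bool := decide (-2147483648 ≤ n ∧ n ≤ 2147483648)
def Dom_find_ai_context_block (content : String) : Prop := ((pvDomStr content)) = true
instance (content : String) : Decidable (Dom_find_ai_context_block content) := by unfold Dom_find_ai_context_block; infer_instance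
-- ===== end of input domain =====

-- B replaces A's single stateful break-loop by two independent passes (first end
-- marker forward, then last start marker via a reversed scan of the prefix): a
-- different decomposition, same cost (objective: alternative).

-- ===== PORT A =====
-- A's loop: carries start_index, breaks on the first end-marker line.
def pvLoopA : List String → Int → Int → Int × Int
  | [], _, s => (s, -1)
  | l :: ls, i, s =>
    let s' := if PySem.Str.isIn "# <ai_context>" l then i else s
    if PySem.Str.isIn "# </ai_context>" l then (s', i) else pvLoopA ls (i + 1) s'

def find_ai_context_block (content : String) : Int × Int :=
  pvLoopA (PySem.Str.splitlines content) 0 (-1)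

-- ===== PORT B =====
-- next((i for i, line in pairs if marker in line), -1)
def pvFirstMatch (marker : String) : List (Int × String) → Int
  | [] => -1
  | (i, l) :: t => if PySem.Str.isIn marker l then i else pvFirstMatch marker t

def find_ai_context_block_alt (content : String) : Int × Int :=
  let lines := PySem.Str.splitlines content
  let e := pvFirstMatch "# </ai_context>" (PySem.List.enumerate lines 0)
  let search := if e = -1 then lines else PySem.List.slice lines none (some (e + 1))
  let s := pvFirstMatch "# <ai_context>" (PySem.List.enumerate search 0).reverse
  (s, e)

-- ===== PRECONDITION & SPEC =====
def Spec_find_ai_context_block (content : String) (out : Int × Int) : Prop := out = find_ai_context_block_alt content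
instance (content : String) (out : Int × Int) : Decidable (Spec_find_ai_context_block content out) := by unfold Spec_find_ai_context_block; infer_instance

-- ===== CLAIM (what is proved, stated in full; the proofs are below) =====
def Claim_equal_find_ai_context_block : Prop := ∀ (content : String), Dom_find_ai_context_block content → Spec_find_ai_context_block content (find_ai_context_block content)

-- ===== LEMMAS AND PROOFS =====

-- Marker-generic versions of both programs' loops (p = start test, q = end test).
def gFirst (p : String → Bool) : List (Int × String) → Int
  | [] => -1
  | (i, l) :: t => if p l then i else gFirst p t

def gLoop (p q : String → Bool) : List String → Int → Int → Int × Int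
  | [], _, s => (s, -1)
  | l :: ls, i, s =>
    let s' := if p l then i else s
    if q l then (s', i) else gLoop p q ls (i + 1) s'

-- index of the first line satisfying q
def gFE (q : String → Bool) : List String → Option Nat
  | [] => none
  | l :: t => if q l then some 0 else (gFE q t).map (· + 1)

-- index of the last line satisfying p
def gLS (p : String → Bool) : List String → Option Nat
  | [] => none
  | l :: t =>
    match gLS p t with
    | some k => some (k + 1)
    | none => if p l then some 0 else none

def gSpec (p q : String → Bool) (ls : List String) (i s : Int) : Int × Int :=
  match gFE q ls with
  | none => (match gLS p ls with | none => s | some k => i + k, -1)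
  | some j => (match gLS p (ls.take (j + 1)) with | none => s | some k => i + k, i + j)

theorem gLoop_eq (p q : String → Bool) (ls : List String) :
    ∀ i s : Int, gLoop p q ls i s = gSpec p q ls i s := by
  induction ls with
  | nil => intro i s; rfl
  | cons l t ih =>
    intro i s
    by_cases he : q l = true
    · simp only [gLoop, gSpec, gFE, he, if_true]
      by_cases hp : p l = true <;> simp [gLS, hp]
    · simp only [gLoop, gSpec, gFE, he, Bool.false_eq_true, reduceIte]
      rw [ih (i + 1) _]
      cases hfe : gFE q t with
      | none =>
        simp only [gSpec, hfe, Option.map_none]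
        cases hls : gLS p t with
        | none =>
          simp only [gLS, hls]
          by_cases hp : p l = true <;> simp [hp]
        | some k =>
          simp only [gLS, hls, Prod.mk.injEq]
          constructor <;> push_cast <;> ring
      | some j =>
        simp only [gSpec, hfe, Option.map_some]
        rw [show (l :: t).take (j + 1 + 1) = l :: t.take (j + 1) from rfl]
        simp only [gLS]
        cases hls : gLS p (t.take (j + 1)) with
        | none =>
          by_cases hp : p l = true <;>
            simp only [hp, Bool.false_eq_true, reduceIte, Prod.mk.injEq] <;>
            (constructor <;> push_cast <;> ring)
        | some k =>
          simp only [Prod.mk.injEq]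
          constructor <;> push_cast <;> ring

theorem gFM_end (q : String → Bool) (ls : List String) : ∀ i : Int,
    gFirst q (PySem.List.enumerate ls i)
      = match gFE q ls with | none => -1 | some j => i + j := by
  induction ls with
  | nil => intro i; rfl
  | cons l t ih =>
    intro i
    rw [PySem.List.enumerate_cons]
    by_cases he : q l = true
    · simp [gFirst, gFE, he]
    · simp only [gFirst, gFE, he, Bool.false_eq_true, reduceIte]
      rw [ih (i + 1)]
      cases hfe : gFE q t with
      | none => simp only [Option.map_none]
      | some j => simp only [Option.map_some]; push_cast; ring

theorem gFM_concat (p : String → Bool) (xs : List (Int × String)) (j : Int) (l : String) :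
    gFirst p (xs ++ [(j, l)])
      = if xs.any (fun x => p x.2) then gFirst p xs
        else if p l then j else -1 := by
  induction xs with
  | nil => simp [gFirst]
  | cons x t ih =>
    obtain ⟨xi, xl⟩ := x
    by_cases hx : p xl = true
    · simp [gFirst, hx]
    · simp only [List.cons_append, gFirst, hx, Bool.false_eq_true, reduceIte, List.any_cons,
        Bool.false_or]
      exact ih

theorem gLS_none_iff (p : String → Bool) (ls : List String) :
    gLS p ls = none ↔ ls.any p = false := by
  induction ls with
  | nil => simp [gLS]
  | cons l t ih =>
    simp only [gLS, List.any_cons, Bool.or_eq_false_iff]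
    cases hls : gLS p t with
    | some k =>
      have hne : t.any p ≠ false := fun h => by
        rw [ih.mpr h] at hls; simp at hls
      constructor
      · intro h; cases h
      · rintro ⟨-, h2⟩; exact absurd h2 hne
    | none =>
      have h2 := ih.mp hls
      by_cases hp : p l = true <;> simp [hp, h2]

theorem gFM_rev (p : String → Bool) (ls : List String) : ∀ i : Int,
    gFirst p (PySem.List.enumerate ls i).reverse
      = match gLS p ls with | none => -1 | some k => i + k := by
  induction ls with
  | nil => intro i; rfl
  | cons l t ih =>
    intro i
    rw [PySem.List.enumerate_cons]
    simp only [List.reverse_cons]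
    rw [gFM_concat]
    have hany : ((PySem.List.enumerate t (i + 1)).reverse.any fun x => p x.2) = t.any p := by
      rw [List.any_reverse]
      calc ((PySem.List.enumerate t (i + 1)).any fun x => p x.2)
          = (((PySem.List.enumerate t (i + 1)).map (·.2)).any p) := by rw [List.any_map]; rfl
        _ = t.any p := by rw [PySem.List.map_snd_enumerate]
    rw [hany]
    cases hls : gLS p t with
    | none =>
      rw [(gLS_none_iff p t).mp hls]
      simp only [Bool.false_eq_true, reduceIte]
      by_cases hp : p l = true <;> simp [gLS, hls, hp]
    | some k =>
      have hany2 : t.any p = true := by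
        by_contra h
        have h' : t.any p = false := by revert h; cases t.any p <;> simp
        rw [(gLS_none_iff p t).mpr h'] at hls; simp at hls
      rw [hany2, if_pos rfl, ih (i + 1)]
      simp only [gLS, hls]
      push_cast; ring

-- the concrete ports are instances of the generic loops
theorem pvLoopA_eq_g (ls : List String) : ∀ i s : Int,
    pvLoopA ls i s
      = gLoop (fun l => PySem.Str.isIn "# <ai_context>" l)
              (fun l => PySem.Str.isIn "# </ai_context>" l) ls i s := by
  induction ls with
  | nil => intro i s; rfl
  | cons l t ih => intro i s; simp only [pvLoopA, gLoop, ih]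

theorem pvFirstMatch_eq_g (m : String) (zs : List (Int × String)) :
    pvFirstMatch m zs = gFirst (fun l => PySem.Str.isIn m l) zs := by
  induction zs with
  | nil => rfl
  | cons z t ih => obtain ⟨zi, zl⟩ := z; simp only [pvFirstMatch, gFirst, ih]

theorem pvMain (ls : List String) :
    pvLoopA ls 0 (-1) =
      (let e := pvFirstMatch "# </ai_context>" (PySem.List.enumerate ls 0)
       let search := if e = -1 then ls else PySem.List.slice ls none (some (e + 1))
       let s := pvFirstMatch "# <ai_context>" (PySem.List.enumerate search 0).reverse
       (s, e)) := by
  rw [pvLoopA_eq_g ls 0 (-1), gLoop_eq]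
  simp only [pvFirstMatch_eq_g]
  rw [gFM_end]
  cases hfe : gFE (fun l => PySem.Str.isIn "# </ai_context>" l) ls with
  | none =>
    simp only [gSpec, hfe, reduceIte]
    rw [gFM_rev]
  | some j =>
    simp only [gSpec, hfe, zero_add]
    have hne : ((j : Int) ≠ -1) := by omega
    rw [if_neg hne]
    have hslice : PySem.List.slice ls none (some ((j : Int) + 1)) = ls.take (j + 1) := by
      have hcast : ((j : Int) + 1) = ((j + 1 : Nat) : Int) := by push_cast; ring
      rw [hcast, PySem.List.slice_to_natCast]
    rw [hslice, gFM_rev]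
    simp only [zero_add]

-- ===== VERDICT (by name: the statement is the Claim_ definition above) =====
theorem find_ai_context_block_spec : Claim_equal_find_ai_context_block := by
  intro content _
  show find_ai_context_block content = find_ai_context_block_alt content
  unfold find_ai_context_block find_ai_context_block_alt
  exact pvMain (PySem.Str.splitlines content)
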